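-- pv_equiv track=rewrite | github.com/simo-an/pytorch-tutorial | 02-beginner/algorithm/dynamic_programming.py | get_max_result
-- ===== SOURCE A (Python) =====
-- def range_max(M, i, j):
--     if i == j: return -1
--
--     MAX = -1
--     for k in range(i, j):
--         TEMP = M[i][k] * M[k+1][j] + 1
--         if TEMP > MAX:
--             MAX = TEMP
--
--     return MAX
--
-- def get_max_result(a):
--     n = len(a)
--     M = [[0 for i in range(n)] for j in range(n)]
--
--     for i in range(n):
--         for j in range(n):
--             if j + i >= n: continue
--
--             if i == 0:
--                 M[j][j] = a[j]
--             else: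
--                 M[j][j+i] = range_max(M, j, j+i)
--
--     return M[0][n-1]
-- ===== SOURCE B (Python) =====
-- def get_max_result(a):
--     memo = {}
--
--     def solve(i, j):
--         key = (i, j)
--         val = memo.get(key)
--         if val is not None:
--             return val
--         if i == j:
--             val = a[i]
--         else:
--             val = -1
--             for k in range(i, j):
--                 t = solve(i, k) * solve(k + 1, j) + 1
--                 if t > val:
--                     val = t
--         memo[key] = val
--         return val
--
--     return solve(0, len(a) - 1)
-- ===== Notes on version B (the rewrite author's own statement) =====
-- stated objective: alternative
-- what changed: Replaces A's bottom-up n*n matrix fill (with an unused lower triangle) by top-down recursion on the interval (i,j) memoized in a dictionary keyed by the interval.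
import Mathlib
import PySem

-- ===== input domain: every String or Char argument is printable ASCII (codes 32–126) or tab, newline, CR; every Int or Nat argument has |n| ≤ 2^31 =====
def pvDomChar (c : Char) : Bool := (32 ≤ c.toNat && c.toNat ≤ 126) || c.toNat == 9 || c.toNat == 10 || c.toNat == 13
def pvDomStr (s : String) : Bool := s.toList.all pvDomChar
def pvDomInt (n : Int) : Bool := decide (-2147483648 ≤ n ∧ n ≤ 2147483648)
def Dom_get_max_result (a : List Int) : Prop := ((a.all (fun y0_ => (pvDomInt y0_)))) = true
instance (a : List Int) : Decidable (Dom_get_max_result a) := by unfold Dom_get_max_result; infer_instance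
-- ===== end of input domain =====

-- B replaces A's bottom-up n×n matrix fill by top-down interval recursion memoized in a dict (alternative decomposition, same cost).


-- ===== PORT A =====
-- matrix cell read M[r][c]; in A every index is a nonnegative in-range Nat, so getD is exact there
def geti (M : List (List Int)) (r c : Nat) : Int := (M.getD r []).getD c 0
-- matrix cell write M[r][c] = v
def setCell (M : List (List Int)) (r c : Nat) (v : Int) : List (List Int) :=
  M.set r ((M.getD r []).set c v)

def range_max (M : List (List Int)) (i j : Nat) : Int :=
  if i = j then -1
  else (List.range' i (j - i)).foldl (fun MAX k =>
    let TEMP := geti M i k * geti M (k+1) j + 1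
    if TEMP > MAX then TEMP else MAX) (-1)

-- the body of A's inner loop
def innerStep (a : List Int) (n i : Nat) (M : List (List Int)) (j : Nat) : List (List Int) :=
  if n ≤ j + i then M
  else if i = 0 then setCell M j j (a.getD j 0)
  else setCell M j (j+i) (range_max M j (j+i))

def get_max_result (a : List Int) : Int :=
  let n := a.length
  let M0 : List (List Int) := List.replicate n (List.replicate n 0)
  let Mf := (List.range n).foldl (fun M i => (List.range n).foldl (innerStep a n i) M) M0
  (Mf.getD 0 []).getD (n-1) 0

-- ===== PORT B =====
-- Source B's memoized solve(i, j); fuel is only a totality device, n is always enough for the initial call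
def solveB (a : List Int) : Nat → Nat → Nat → PySem.Dict (Nat × Nat) Int → Int × PySem.Dict (Nat × Nat) Int
  | 0, _, _, memo => (0, memo)
  | f+1, i, j, memo =>
    match memo.get? (i, j) with
    | some v => (v, memo)
    | none =>
      if i = j then
        let v := a.getD i 0
        (v, memo.insert (i, j) v)
      else
        let r := (List.range' i (j - i)).foldl (fun (p : Int × PySem.Dict (Nat × Nat) Int) k =>
          let q1 := solveB a f i k p.2
          let q2 := solveB a f (k+1) j q1.2
          let t := q1.1 * q2.1 + 1
          (if t > p.1 then t else p.1, q2.2)) (-1, memo)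
        (r.1, r.2.insert (i, j) r.1)

def get_max_result_alt (a : List Int) : Int :=
  (solveB a a.length 0 (a.length - 1) PySem.Dict.empty).1

-- ===== PRECONDITION & SPEC =====
-- Pre_ excludes only the empty list, on which A raises IndexError (M[0][-1] on an empty matrix).
def Pre_get_max_result (a : List Int) : Prop := a ≠ []
instance (a : List Int) : Decidable (Pre_get_max_result a) := by unfold Pre_get_max_result; infer_instance
def pvWitness_get_max_result : List Int := [3, 4, 5]

def Spec_get_max_result (a : List Int) (out : Int) : Prop := out = get_max_result_alt a
instance (a : List Int) (out : Int) : Decidable (Spec_get_max_result a out) := by unfold Spec_get_max_result; infer_instance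

-- ===== CLAIM (what is proved, stated in full; the proofs are below) =====
def Claim_equal_get_max_result : Prop := ∀ (a : List Int), Dom_get_max_result a → Pre_get_max_result a → Spec_get_max_result a (get_max_result a)

-- ===== LEMMAS AND PROOFS =====

def gF (a : List Int) : Nat → Nat → Nat → Int
  | 0, i, _ => a.getD i 0
  | f+1, i, j =>
    if i = j then a.getD i 0
    else (List.range' i (j - i)).foldl (fun best k => max best (gF a f i k * gF a f (k+1) j + 1)) (-1)

def g (a : List Int) (i j : Nat) : Int := gF a (j - i) i j

theorem gF_stable (a : List Int) : ∀ f i j, i ≤ j → j - i ≤ f → gF a f i j = g a i j := by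
  intro f
  induction f using Nat.strong_induction_on with
  | _ f IH =>
    intro i j hij hle
    match f with
    | 0 =>
      have : i = j := by omega
      subst this
      simp [g, gF]
    | f+1 =>
      by_cases h : i = j
      · subst h; simp [g, gF]
      · have hlt : i < j := by omega
        have hji : j - i = (j - i - 1) + 1 := by omega
        rw [g, hji]
        show gF a (f+1) i j = gF a (j-i-1+1) i j
        simp only [gF, if_neg h]
        rw [hji]
        apply PySem.List.foldl_congr_mem
        intro acc k hk
        rw [List.mem_range'_1] at hk
        have h1 : k - i ≤ f := by omega
        have h1' : k - i ≤ j - i - 1 := by omega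
        have h2 : j - (k+1) ≤ f := by omega
        have h2' : j - (k+1) ≤ j - i - 1 := by omega
        simp only [Nat.add_sub_cancel]
        rw [IH f (by omega) i k (by omega) h1, IH f (by omega) (k+1) j (by omega) h2,
            IH (j-i-1) (by omega) i k (by omega) h1', IH (j-i-1) (by omega) (k+1) j (by omega) h2']

theorem g_unfold (a : List Int) (i j : Nat) (h : i < j) :
    g a i j = (List.range' i (j - i)).foldl (fun best k => max best (g a i k * g a (k+1) j + 1)) (-1) := by
  have hji : j - i = (j - i - 1) + 1 := by omega
  rw [g, hji]
  simp only [gF, if_neg (by omega : ¬ i = j)]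
  rw [hji]
  apply PySem.List.foldl_congr_mem
  intro acc k hk
  rw [List.mem_range'_1] at hk
  rw [gF_stable a _ i k (by omega) (by omega), gF_stable a _ (k+1) j (by omega) (by omega)]


def InvM (a : List Int) (m : PySem.Dict (Nat × Nat) Int) : Prop :=
  ∀ i j v, m.get? (i, j) = some v → v = g a i j

theorem solveB_correct (a : List Int) : ∀ f i j memo, i ≤ j → j - i < f → InvM a memo →
    (solveB a f i j memo).1 = g a i j ∧ InvM a (solveB a f i j memo).2 := by
  intro f
  induction f with
  | zero => intro i j memo _ h; omega
  | succ f IH =>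
    intro i j memo hij hf hm
    show (match memo.get? (i, j) with
      | some v => (v, memo)
      | none => _).1 = _ ∧ InvM a (match memo.get? (i, j) with
      | some v => (v, memo)
      | none => _).2
    cases hget : memo.get? (i, j) with
    | some v => exact ⟨hm i j v hget, hm⟩
    | none =>
      by_cases h : i = j
      · subst h
        simp only [if_true]
        refine ⟨by simp [g, gF], ?_⟩
        intro i' j' v' hv'
        rw [PySem.Dict.get?_insert] at hv'
        split at hv'
        · rename_i he
          simp only [Prod.mk.injEq] at he
          obtain ⟨rfl, rfl⟩ := he
          simpa [g, gF] using (Option.some.injEq .. ▸ hv').symm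
        · exact hm i' j' v' hv'
      · simp only [if_neg h]
        have hlt : i < j := by omega
        -- fold invariant
        have key : ∀ (l : List Nat), (∀ k ∈ l, i ≤ k ∧ k < j) → ∀ (best : Int) (m : PySem.Dict (Nat × Nat) Int), InvM a m →
            (l.foldl (fun (p : Int × PySem.Dict (Nat × Nat) Int) k =>
              let q1 := solveB a f i k p.2
              let q2 := solveB a f (k+1) j q1.2
              let t := q1.1 * q2.1 + 1
              (if t > p.1 then t else p.1, q2.2)) (best, m)).1
              = l.foldl (fun b k => max b (g a i k * g a (k+1) j + 1)) best ∧
            InvM a (l.foldl (fun (p : Int × PySem.Dict (Nat × Nat) Int) k =>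
              let q1 := solveB a f i k p.2
              let q2 := solveB a f (k+1) j q1.2
              let t := q1.1 * q2.1 + 1
              (if t > p.1 then t else p.1, q2.2)) (best, m)).2 := by
          intro l
          induction l with
          | nil => intro _ best m hm; exact ⟨rfl, hm⟩
          | cons x xs ihl =>
            intro hmem best m hminv
            have hx := hmem x (List.mem_cons_self ..)
            have h1 := IH i x m (by omega) (by omega) hminv
            have h2 := IH (x+1) j (solveB a f i x m).2 (by omega) (by omega) h1.2
            simp only [List.foldl_cons]
            rw [h1.1, h2.1, (by simp only [max_def]; split_ifs <;> omega :
              (if g a i x * g a (x+1) j + 1 > best then g a i x * g a (x+1) j + 1 else best)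
                = max best (g a i x * g a (x+1) j + 1))]
            exact ihl (fun k hk => hmem k (List.mem_cons_of_mem _ hk)) _ _ h2.2
        have hk := key (List.range' i (j - i)) (by intro k hk; rw [List.mem_range'_1] at hk; omega) (-1) memo hm
        refine ⟨?_, ?_⟩
        · rw [hk.1, g_unfold a _ _ hlt]
        · intro i' j' v' hv'
          rw [PySem.Dict.get?_insert] at hv'
          split at hv'
          · rename_i he
            simp only [Prod.mk.injEq] at he
            obtain ⟨rfl, rfl⟩ := he
            rw [← Option.some.inj hv', hk.1, g_unfold a _ _ hlt]
          · exact hk.2 i' j' v' hv'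


def Shape (n : Nat) (M : List (List Int)) : Prop :=
  M.length = n ∧ ∀ r < n, (M.getD r []).length = n

theorem getD_row_set (M : List (List Int)) (r r' : Nat) (row : List Int) (hr : r < M.length) :
    (M.set r row).getD r' [] = if r' = r then row else M.getD r' [] := by
  rw [List.getD_eq_getElem?_getD, List.getD_eq_getElem?_getD, List.getElem?_set]
  by_cases h : r' = r
  · rw [if_pos h.symm, if_pos hr, if_pos h]; rfl
  · rw [if_neg (fun hh => h hh.symm), if_neg h]

theorem geti_setCell (M : List (List Int)) (r c : Nat) (v : Int) (r' c' : Nat)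
    (hr : r < M.length) (hc : c < (M.getD r []).length) :
    geti (setCell M r c v) r' c' = if r' = r ∧ c' = c then v else geti M r' c' := by
  unfold geti setCell
  rw [getD_row_set M r r' _ hr]
  by_cases h1 : r' = r
  · rw [if_pos h1, List.getD_eq_getElem?_getD, List.getElem?_set]
    by_cases h2 : c' = c
    · rw [if_pos h2.symm, if_pos hc, if_pos ⟨h1, h2⟩]; rfl
    · rw [if_neg (fun hh => h2 hh.symm), if_neg (fun hh : _ ∧ _ => h2 hh.2),
          ← List.getD_eq_getElem?_getD, h1]
  · rw [if_neg h1, if_neg (fun hh : _ ∧ _ => h1 hh.1)]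

theorem shape_setCell (n : Nat) (M : List (List Int)) (r c : Nat) (v : Int)
    (hS : Shape n M) (hr : r < n) : Shape n (setCell M r c v) := by
  obtain ⟨hlen, hrow⟩ := hS
  refine ⟨by simp [setCell, hlen], ?_⟩
  intro r' hr'
  unfold setCell
  rw [getD_row_set M r r' _ (by omega)]
  split
  · rw [List.length_set]; exact hrow r hr
  · exact hrow r' hr'

theorem shape_init (n : Nat) : Shape n (List.replicate n (List.replicate n 0)) := by
  refine ⟨by simp, ?_⟩
  intro r hr
  rw [List.getD_eq_getElem?_getD, List.getElem?_replicate, if_pos hr]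
  simp

def Out (a : List Int) (n i : Nat) (M : List (List Int)) : Prop :=
  Shape n M ∧ ∀ e j₀, e < i → j₀ + e < n → geti M j₀ (j₀+e) = g a j₀ (j₀+e)

def InnerInv (a : List Int) (n i j : Nat) (M : List (List Int)) : Prop :=
  Out a n i M ∧ ∀ j₀ < j, j₀ + i < n → geti M j₀ (j₀+i) = g a j₀ (j₀+i)

theorem range_max_eq (a : List Int) (n : Nat) (M : List (List Int)) (i j : Nat)
    (hO : Out a n i M) (hi : 0 < i) (hjn : j + i < n) :
    range_max M j (j+i) = g a j (j+i) := by
  rw [range_max, if_neg (by omega : ¬ j = j + i), g_unfold a j (j+i) (by omega)]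
  apply PySem.List.foldl_congr_mem
  intro acc k hk
  rw [List.mem_range'_1] at hk
  have hbk : j ≤ k ∧ k < j + i := by omega
  have e1 : geti M j k = g a j k := by
    have := hO.2 (k - j) j (by omega) (by omega)
    rwa [(by omega : j + (k - j) = k)] at this
  have e2 : geti M (k+1) (j+i) = g a (k+1) (j+i) := by
    have := hO.2 (j + i - (k+1)) (k+1) (by omega) (by omega)
    rwa [(by omega : k + 1 + (j + i - (k+1)) = j + i)] at this
  rw [e1, e2]
  simp only [max_def]
  split_ifs <;> omega

theorem innerStep_inv (a : List Int) (n i j : Nat) (M : List (List Int))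
    (h : InnerInv a n i j M) : InnerInv a n i (j+1) (innerStep a n i M j) := by
  obtain ⟨⟨hS, hOld⟩, hRow⟩ := h
  unfold innerStep
  by_cases hskip : n ≤ j + i
  · rw [if_pos hskip]
    refine ⟨⟨hS, hOld⟩, ?_⟩
    intro j₀ hj₀ hjn
    rcases Nat.lt_succ_iff_lt_or_eq.mp hj₀ with h' | h'
    · exact hRow j₀ h' hjn
    · omega
  · rw [if_neg hskip]
    have hjlt : j < n := by omega
    have hjM : j < M.length := by have := hS.1; omega
    have hrowlen : (M.getD j []).length = n := hS.2 j hjlt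
    by_cases hi0 : i = 0
    · rw [if_pos hi0]
      subst hi0
      refine ⟨⟨shape_setCell n M j j _ hS hjlt, by intro e _ h _; omega⟩, ?_⟩
      intro j₀ hj₀ hjn
      rw [geti_setCell M j j _ j₀ (j₀+0) hjM (by omega)]
      rcases Nat.lt_succ_iff_lt_or_eq.mp hj₀ with h' | h'
      · rw [if_neg (by omega : ¬ (j₀ = j ∧ j₀ + 0 = j))]
        exact hRow j₀ h' hjn
      · rw [if_pos ⟨h', by omega⟩, h']
        simp [g, gF]
    · rw [if_neg hi0]
      have hval : range_max M j (j+i) = g a j (j+i) :=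
        range_max_eq a n M i j ⟨hS, hOld⟩ (by omega) (by omega)
      refine ⟨⟨shape_setCell n M j (j+i) _ hS hjlt, ?_⟩, ?_⟩
      · intro e j₀ he hjn
        rw [geti_setCell M j (j+i) _ j₀ (j₀+e) hjM (by omega),
            if_neg (by omega : ¬ (j₀ = j ∧ j₀ + e = j + i))]
        exact hOld e j₀ he hjn
      · intro j₀ hj₀ hjn
        rw [geti_setCell M j (j+i) _ j₀ (j₀+i) hjM (by omega)]
        rcases Nat.lt_succ_iff_lt_or_eq.mp hj₀ with h' | h'
        · rw [if_neg (by omega : ¬ (j₀ = j ∧ j₀ + i = j + i))]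
          exact hRow j₀ h' hjn
        · rw [if_pos ⟨h', by rw [h']⟩, h', hval]

theorem inner_loop (a : List Int) (n i : Nat) :
    ∀ (m j : Nat) (M : List (List Int)), InnerInv a n i j M →
      InnerInv a n i (j+m) ((List.range' j m).foldl (innerStep a n i) M) := by
  intro m
  induction m with
  | zero => intro j M h; simpa using h
  | succ m ih =>
    intro j M h
    rw [List.range'_succ, List.foldl_cons]
    have := ih (j+1) _ (innerStep_inv a n i j M h)
    rwa [(by omega : j + 1 + m = j + (m+1))] at this

theorem outer_step (a : List Int) (n i : Nat) (M : List (List Int)) (h : Out a n i M) :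
    Out a n (i+1) ((List.range n).foldl (innerStep a n i) M) := by
  have h0 : InnerInv a n i 0 M := ⟨h, by intro j₀ hj₀; omega⟩
  have := inner_loop a n i n 0 M h0
  rw [List.range_eq_range']
  refine ⟨this.1.1, ?_⟩
  intro e j₀ he hjn
  rcases Nat.lt_succ_iff_lt_or_eq.mp he with h' | h'
  · exact this.1.2 e j₀ h' hjn
  · subst h'
    exact this.2 j₀ (by omega) hjn

theorem outer_loop (a : List Int) (n : Nat) :
    ∀ (m i : Nat) (M : List (List Int)), Out a n i M →
      Out a n (i+m) ((List.range' i m).foldl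
        (fun M i => (List.range n).foldl (innerStep a n i) M) M) := by
  intro m
  induction m with
  | zero => intro i M h; simpa using h
  | succ m ih =>
    intro i M h
    rw [List.range'_succ, List.foldl_cons]
    have := ih (i+1) _ (outer_step a n i M h)
    rwa [(by omega : i + 1 + m = i + (m+1))] at this

theorem alt_eq_g (a : List Int) (hn : 1 ≤ a.length) :
    get_max_result_alt a = g a 0 (a.length - 1) := by
  have hinv : InvM a PySem.Dict.empty := by
    intro i j v h
    rw [PySem.Dict.get?_empty] at h
    cases h
  exact (solveB_correct a a.length 0 (a.length - 1) PySem.Dict.empty (by omega) (by omega) hinv).1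

theorem a_eq_g (a : List Int) (hn : 1 ≤ a.length) :
    get_max_result a = g a 0 (a.length - 1) := by
  show (((List.range a.length).foldl
      (fun M i => (List.range a.length).foldl (innerStep a a.length i) M)
      (List.replicate a.length (List.replicate a.length 0))).getD 0 []).getD (a.length - 1) 0
    = g a 0 (a.length - 1)
  have hout := outer_loop a a.length a.length 0
    (List.replicate a.length (List.replicate a.length 0))
    ⟨shape_init a.length, by intro e j₀ he; omega⟩
  have := hout.2 (a.length - 1) 0 (by omega) (by omega)
  unfold geti at this
  rw [← List.range_eq_range'] at this
  rwa [(by omega : 0 + (a.length - 1) = a.length - 1)] at this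

-- ===== VERDICT (by name: the statement is the Claim_ definition above) =====
theorem get_max_result_spec : Claim_equal_get_max_result := by
  intro a _ hpre
  have hn : 1 ≤ a.length := by
    cases a with
    | nil => exact absurd rfl hpre
    | cons x xs => simp
  unfold Spec_get_max_result
  rw [a_eq_g a hn, alt_eq_g a hn]
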